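-- pv_equiv track=rewrite | github.com/rmkenv/pipewrench | ai_service.py | _extract_swot_from_report
-- ===== SOURCE A (Python) =====
-- from typing import List, Dict, Any, Optional
--
-- def _extract_swot_from_report(report_content: str) -> Dict[str, List[str]]:
--     """Extract SWOT analysis from report content"""
--     # Simple extraction - could be enhanced with NLP
--     swot = {
--         "strengths": [],
--         "weaknesses": [],
--         "opportunities": [],
--         "threats": []
--     }
--
--     lines = report_content.split('\n')
--     current_section = None
--
--     for line in lines:
--         line = line.strip()
--         if 'Strengths' in line and '##' in line:
--             current_section = 'strengths'
--         elif 'Weaknesses' in line and '##' in line: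
--             current_section = 'weaknesses'
--         elif 'Opportunities' in line and '##' in line:
--             current_section = 'opportunities'
--         elif 'Threats' in line and '##' in line:
--             current_section = 'threats'
--         elif line.startswith('##') or line.startswith('#'):
--             current_section = None
--         elif current_section and line and (line.startswith('-') or line.startswith('*')):
--             item = line.lstrip('- *').strip()
--             if item:
--                 swot[current_section].append(item)
--
--     return swot
-- ===== SOURCE B (Python) =====
-- def _extract_swot_from_report(report_content: str):
--     """Extract SWOT analysis from report content (two-phase: group lines into
--     labelled blocks, then collect bullet items per block)."""
--
--     def classify(line):
--         # header line starting a new block? returns section name, '' for a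
--         # non-SWOT header (reset), or None for an ordinary body line
--         has_hh = '##' in line
--         if has_hh and 'Strengths' in line:
--             return 'strengths'
--         if has_hh and 'Weaknesses' in line:
--             return 'weaknesses'
--         if has_hh and 'Opportunities' in line:
--             return 'opportunities'
--         if has_hh and 'Threats' in line:
--             return 'threats'
--         if line.startswith('#'):
--             return ''
--         return None
--
--     # phase 1: partition stripped lines into consecutive labelled blocks
--     blocks = []
--     label, body = None, []
--     for raw in report_content.split('\n'):
--         line = raw.strip()
--         c = classify(line)
--         if c is None:
--             body.append(line)
--         else:
--             blocks.append((label, body))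
--             label, body = (c or None), []
--     blocks.append((label, body))
--
--     # phase 2: collect the bullet items of each labelled block
--     swot = {"strengths": [], "weaknesses": [], "opportunities": [], "threats": []}
--     for label, body in blocks:
--         if label is None:
--             continue
--         for line in body:
--             if line and (line.startswith('-') or line.startswith('*')):
--                 item = line.lstrip('- *').strip()
--                 if item:
--                     swot[label].append(item)
--     return swot
-- ===== Notes on version B (the rewrite author's own statement) =====
-- stated objective: alternative
-- what changed: Replaces A's single stateful loop (a current-section register mutated while scanning every line) by a two-phase pipeline: first partition the stripped lines into consecutive labelled blocks using a pure classify function, then collect the bullet items of each labelled block into the dict.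
import Mathlib
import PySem

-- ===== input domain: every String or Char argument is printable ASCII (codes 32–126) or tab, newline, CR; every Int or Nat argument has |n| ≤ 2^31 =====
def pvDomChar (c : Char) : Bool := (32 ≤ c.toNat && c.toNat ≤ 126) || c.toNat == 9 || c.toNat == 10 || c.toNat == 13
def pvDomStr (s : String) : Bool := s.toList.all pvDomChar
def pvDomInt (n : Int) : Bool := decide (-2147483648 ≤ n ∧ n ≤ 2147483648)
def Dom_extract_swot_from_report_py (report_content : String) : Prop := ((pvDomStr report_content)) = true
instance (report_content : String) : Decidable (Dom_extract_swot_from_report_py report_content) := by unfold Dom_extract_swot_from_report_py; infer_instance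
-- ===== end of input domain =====

-- B re-decomposes A's single stateful loop into two phases (group stripped lines into
-- labelled blocks, then collect bullet items per block); objective: alternative decomposition, same cost.

-- ===== PORT A =====
-- exact hand port of Python s.lstrip('- *'): drop leading characters belonging to the set {'-', ' ', '*'}
def pvLstripDashStar (s : String) : String :=
  String.ofList (s.toList.dropWhile (fun c => c = '-' || c = ' ' || c = '*'))

def pvInitSwot : PySem.Dict String (List String) :=
  PySem.Dict.ofList [("strengths", []), ("weaknesses", []), ("opportunities", []), ("threats", [])]

-- the body of A's for-loop, step for step (branches in A's order)
def pvStepA (st : Option String × PySem.Dict String (List String)) (l : String) :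
    Option String × PySem.Dict String (List String) :=
  let line := PySem.Str.strip l
  let cur := st.1
  let d := st.2
  if PySem.Str.isIn "Strengths" line && PySem.Str.isIn "##" line then (some "strengths", d)
  else if PySem.Str.isIn "Weaknesses" line && PySem.Str.isIn "##" line then (some "weaknesses", d)
  else if PySem.Str.isIn "Opportunities" line && PySem.Str.isIn "##" line then (some "opportunities", d)
  else if PySem.Str.isIn "Threats" line && PySem.Str.isIn "##" line then (some "threats", d)
  else if PySem.Str.startswith line "##" || PySem.Str.startswith line "#" then (none, d)
  else
    match cur with
    | some k =>
        if (line ≠ "") && (PySem.Str.startswith line "-" || PySem.Str.startswith line "*") then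
          let item := PySem.Str.strip (pvLstripDashStar line)
          if item ≠ "" then (some k, d.modify k [] (· ++ [item])) else (some k, d)
        else (some k, d)
    | none => (none, d)

def extract_swot_from_report_py (report_content : String) : List (String × List String) :=
  let lines := (PySem.Str.split? report_content "\n").getD []
  (lines.foldl pvStepA (none, pvInitSwot)).2.items

-- ===== PORT B =====
-- Source B's classify: section name for a SWOT '##' header, `some none` for another '#' header (reset), none for a body line
def pvClassify (line : String) : Option (Option String) :=
  let hh := PySem.Str.isIn "##" line
  if hh && PySem.Str.isIn "Strengths" line then some (some "strengths")
  else if hh && PySem.Str.isIn "Weaknesses" line then some (some "weaknesses")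
  else if hh && PySem.Str.isIn "Opportunities" line then some (some "opportunities")
  else if hh && PySem.Str.isIn "Threats" line then some (some "threats")
  else if PySem.Str.startswith line "#" then some none
  else none

-- phase 1: partition the stripped lines into consecutive labelled blocks
def pvBlocks : List String → Option String → List String → List (Option String × List String)
  | [], label, body => [(label, body)]
  | raw :: ls, label, body =>
      let line := PySem.Str.strip raw
      match pvClassify line with
      | none => pvBlocks ls label (body ++ [line])
      | some c => (label, body) :: pvBlocks ls c []

-- phase 2, inner loop: append the bullet items of one body line of a block labelled lab
def pvItemStep (lab : String) (d : PySem.Dict String (List String)) (line : String) :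
    PySem.Dict String (List String) :=
  if (line ≠ "") && (PySem.Str.startswith line "-" || PySem.Str.startswith line "*") then
    let item := PySem.Str.strip (pvLstripDashStar line)
    if item ≠ "" then d.modify lab [] (· ++ [item]) else d
  else d

def extract_swot_from_report_py_alt (report_content : String) : List (String × List String) :=
  let blocks := pvBlocks ((PySem.Str.split? report_content "\n").getD []) none []
  (blocks.foldl
    (fun d blk =>
      match blk.1 with
      | none => d
      | some lab => blk.2.foldl (pvItemStep lab) d)
    pvInitSwot).items

-- ===== PRECONDITION & SPEC =====
def Spec_extract_swot_from_report_py (report_content : String) (out : List (String × List String)) : Prop := out = extract_swot_from_report_py_alt report_content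
instance (report_content : String) (out : List (String × List String)) : Decidable (Spec_extract_swot_from_report_py report_content out) := by unfold Spec_extract_swot_from_report_py; infer_instance

-- ===== CLAIM (what is proved, stated in full; the proofs are below) =====
def Claim_equal_extract_swot_from_report_py : Prop := ∀ (report_content : String), Dom_extract_swot_from_report_py report_content → Spec_extract_swot_from_report_py report_content (extract_swot_from_report_py report_content)

-- ===== LEMMAS AND PROOFS =====

-- process an (optional-label, body) block
def pvProcOpt (c : Option String) (body : List String) (d : PySem.Dict String (List String)) :
    PySem.Dict String (List String) :=
  match c with
  | none => d
  | some lab => body.foldl (pvItemStep lab) d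

-- a line starting with "##" also starts with "#"
theorem startswith_hash_of_hh (line : String) (h : PySem.Str.startswith line "##" = true) :
    PySem.Str.startswith line "#" = true := by
  simp only [PySem.Str.startswith] at h ⊢
  rw [PySem.Chars.startswith_iff] at h ⊢
  exact List.IsPrefix.trans ⟨['#'], rfl⟩ h

-- A's loop body, rephrased through B's classify
theorem stepA_eq (cur : Option String) (d : PySem.Dict String (List String)) (l : String) :
    pvStepA (cur, d) l =
      match pvClassify (PySem.Str.strip l) with
      | some c => (c, d)
      | none => (cur, pvProcOpt cur [PySem.Str.strip l] d) := by
  simp only [pvStepA, pvClassify, pvProcOpt, List.foldl_cons, List.foldl_nil,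
    Bool.and_comm (PySem.Str.isIn "##" (PySem.Str.strip l))]
  by_cases h2s : PySem.Str.startswith (PySem.Str.strip l) "##" = true <;>
  by_cases hs : PySem.Str.startswith (PySem.Str.strip l) "#" = true <;>
    first
    | exact absurd (startswith_hash_of_hh _ h2s) hs
    | (simp only [h2s, hs, Bool.or_true, Bool.or_false,
        Bool.false_eq_true, if_true, if_false] <;>
       split_ifs <;>
       first | rfl | (cases cur <;> simp only [pvItemStep] <;> first | rfl | (split_ifs <;> rfl)))

theorem procOpt_nil (c : Option String) (d : PySem.Dict String (List String)) :
    pvProcOpt c [] d = d := by cases c <;> rfl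

theorem procOpt_append (c : Option String) (acc : List String) (x : String)
    (d : PySem.Dict String (List String)) :
    pvProcOpt c (acc ++ [x]) d = pvProcOpt c [x] (pvProcOpt c acc d) := by
  cases c <;> simp [pvProcOpt, List.foldl_append]

theorem blocks_foldl (ls : List String) (cur : Option String) (acc : List String)
    (d : PySem.Dict String (List String)) :
    (pvBlocks ls cur acc).foldl
        (fun d blk => match blk.1 with | none => d | some lab => blk.2.foldl (pvItemStep lab) d) d
      = (ls.foldl pvStepA (cur, pvProcOpt cur acc d)).2 := by
  induction ls generalizing cur acc d with
  | nil =>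
      simp only [pvBlocks, List.foldl_cons, List.foldl_nil]
      cases cur <;> rfl
  | cons l ls ih =>
      rcases hc : pvClassify (PySem.Str.strip l) with _ | c
      · simp only [pvBlocks, hc, List.foldl_cons, stepA_eq, ih, procOpt_append]
      · simp only [pvBlocks, hc, List.foldl_cons, stepA_eq, ih, procOpt_nil]
        rfl

-- ===== VERDICT (by name: the statement is the Claim_ definition above) =====
theorem extract_swot_from_report_py_spec : Claim_equal_extract_swot_from_report_py := by
  intro report_content _
  show (List.foldl pvStepA (none, pvInitSwot) ((PySem.Str.split? report_content "\n").getD [])).2.items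
      = (List.foldl
          (fun d blk => match blk.1 with | none => d | some lab => List.foldl (pvItemStep lab) d blk.2)
          pvInitSwot
          (pvBlocks ((PySem.Str.split? report_content "\n").getD []) none [])).items
  rw [blocks_foldl]
  rfl
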